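-- pv_equiv track=rewrite | github.com/pdelong21/HTTP-Get-Server-Client | client.py | get_fn
-- ===== SOURCE A (Python) =====
-- def get_fn(s):
--     new = ""
--     b = False
--     for i in s:
--         if b:
--             new += i
--         elif i == '/':
--             b = True
--         else:
--             continue
--     return new
-- ===== SOURCE B (Python) =====
-- def get_fn(s):
--     idx = s.find('/')
--     if idx == -1:
--         return ""
--     return s[idx + 1:]
-- ===== Notes on version B (the rewrite author's own statement) =====
-- stated objective: simpler
-- what changed: Replaces the character-by-character scan with a boolean flag and string accumulation by a single find of the first slash followed by one slice.
import Mathlib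
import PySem

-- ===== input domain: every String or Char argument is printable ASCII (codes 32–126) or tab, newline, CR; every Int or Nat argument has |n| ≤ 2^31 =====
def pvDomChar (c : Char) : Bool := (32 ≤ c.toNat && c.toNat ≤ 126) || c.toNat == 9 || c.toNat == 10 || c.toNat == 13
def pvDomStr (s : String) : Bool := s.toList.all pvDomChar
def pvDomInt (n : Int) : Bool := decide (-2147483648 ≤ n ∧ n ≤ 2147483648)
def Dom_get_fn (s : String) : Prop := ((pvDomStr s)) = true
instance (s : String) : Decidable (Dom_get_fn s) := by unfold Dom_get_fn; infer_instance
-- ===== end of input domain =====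

-- B replaces A's flag-and-accumulate character scan by one find('/') plus one slice (simpler).

-- ===== PORT A =====
-- A's loop: state (new, b); 'new += i' once 'b' is set, 'b' flips at the first '/'.
def pvStepA (st : List Char × Bool) (i : Char) : List Char × Bool :=
  if st.2 then (st.1 ++ [i], st.2)
  else if i = '/' then (st.1, true)
  else st

def get_fn (s : String) : String :=
  String.ofList (s.toList.foldl pvStepA ([], false)).1

-- ===== PORT B =====
def get_fn_alt (s : String) : String :=
  let idx := PySem.Str.find s "/"
  if idx = -1 then "" else PySem.Str.slice s (some (idx + 1)) none

-- ===== PRECONDITION & SPEC =====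
def Spec_get_fn (s : String) (out : String) : Prop := out = get_fn_alt s
instance (s : String) (out : String) : Decidable (Spec_get_fn s out) := by unfold Spec_get_fn; infer_instance

-- ===== CLAIM (what is proved, stated in full; the proofs are below) =====
def Claim_equal_get_fn : Prop := ∀ (s : String), Dom_get_fn s → Spec_get_fn s (get_fn s)

-- ===== LEMMAS AND PROOFS =====
lemma pv_singleton_prefix (a : Char) (xs : List Char) : [a] <+: xs ↔ xs.head? = some a := by
  cases xs <;> simp [List.cons_prefix_cons, eq_comm]

lemma pv_fold_true (l acc : List Char) : l.foldl pvStepA (acc, true) = (acc ++ l, true) := by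
  induction l generalizing acc with
  | nil => simp
  | cons c t ih => simp [pvStepA, ih]

lemma pv_fold_no_slash (l : List Char) (h : '/' ∉ l) :
    l.foldl pvStepA ([], false) = ([], false) := by
  induction l with
  | nil => rfl
  | cons c t ih =>
    simp at h
    have hc : ¬ c = '/' := fun e => h.1 e.symm
    simp [pvStepA, hc, ih h.2]

lemma pv_fold_slash (l : List Char) (n : Nat) (hn : l[n]? = some '/')
    (hmin : ∀ i < n, l[i]? ≠ some '/') :
    (l.foldl pvStepA ([], false)).1 = l.drop (n + 1) := by
  induction l generalizing n with
  | nil => simp at hn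
  | cons c t ih =>
    by_cases hc : c = '/'
    · have hn0 : n = 0 := by
        by_contra h0
        exact hmin 0 (Nat.pos_of_ne_zero h0) (by simp [hc])
      subst hn0; subst hc
      simp [pvStepA, pv_fold_true]
    · match n with
      | 0 => simp at hn; exact absurd hn hc
      | Nat.succ m =>
        have : (t.foldl pvStepA ([], false)).1 = t.drop (m + 1) := by
          apply ih m (by simpa using hn)
          intro i hi
          have := hmin (i + 1) (by omega)
          simpa using this
        simpa [pvStepA, hc] using this

lemma pv_main (s : String) : get_fn s = get_fn_alt s := by
  have hsl : ("/" : String).toList = ['/'] := rfl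
  have hfind : PySem.Str.find s "/" = PySem.Chars.find s.toList ['/'] := by
    rw [PySem.Str.find_eq, hsl]
  by_cases h : '/' ∈ s.toList
  · have hinf : ['/'] <:+: s.toList := (List.singleton_infix_iff _ _).mpr h
    have hnn : 0 ≤ PySem.Chars.find s.toList ['/'] :=
      (PySem.Chars.find_nonneg_iff _ _).mpr hinf
    obtain ⟨hp, hm⟩ := PySem.Chars.find_spec hnn
    set n := (PySem.Chars.find s.toList ['/']).toNat with hndef
    have hn : s.toList[n]? = some '/' := by
      have := (pv_singleton_prefix '/' (s.toList.drop n)).mp hp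
      rwa [List.head?_drop] at this
    have hmin : ∀ i < n, s.toList[i]? ≠ some '/' := by
      intro i hi hc
      exact hm i hi ((pv_singleton_prefix '/' _).mpr (by rwa [List.head?_drop]))
    have hne : PySem.Chars.find s.toList ['/'] ≠ -1 := by omega
    apply String.toList_inj.mp
    simp only [get_fn, get_fn_alt, hfind, if_neg hne]
    rw [String.toList_ofList, PySem.Str.toList_slice, PySem.Chars.slice_eq_listSlice,
      PySem.List.slice_from s.toList (by omega : (0:Int) ≤ PySem.Chars.find s.toList ['/'] + 1)]
    rw [pv_fold_slash s.toList n hn hmin]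
    congr 1
    omega
  · have hne : PySem.Chars.find s.toList ['/'] = -1 :=
      (PySem.Chars.find_eq_neg_one_iff _ _).mpr
        (fun hc => h ((List.singleton_infix_iff _ _).mp hc))
    simp [get_fn, get_fn_alt, hfind, hne, pv_fold_no_slash _ h]

-- ===== VERDICT (by name: the statement is the Claim_ definition above) =====
theorem get_fn_spec : Claim_equal_get_fn := by
  intro s _
  exact pv_main s
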